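-- pv_equiv track=rewrite | github.com/wangkunye/pku-cs | 02692.py | check
-- ===== SOURCE A (Python) =====
-- def check(coins, case):
--     for item in case:
--         left, right, res = item.split()
--
--         left_total = sum(coins[i] for i in left)
--         right_total = sum(coins[i] for i in right)
--
--         if left_total == right_total and res != 'even':
--             return False
--         elif left_total < right_total and res != 'down':
--             return False
--         elif left_total > right_total and res != 'up':
--             return False
--
--     return True
-- ===== SOURCE B (Python) =====
-- def check(coins, case):
--     SIGN = {'even': 0, 'down': -1, 'up': 1}
--
--     def ok(item):
--         left, right, res = item.split()
--         delta = {}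
--         for c in left:
--             delta[c] = delta.get(c, 0) + 1
--         for c in right:
--             delta[c] = delta.get(c, 0) - 1
--         diff = sum(coins[c] * n for c, n in delta.items())
--         return SIGN.get(res) == (diff > 0) - (diff < 0)
--
--     return all(ok(item) for item in case)
-- ===== Notes on version B (the rewrite author's own statement) =====
-- stated objective: alternative
-- what changed: B replaces A's two side-by-side weight sums and three comparison branches by a signed character-multiplicity dict (left +1, right -1) summed once against the coin table, and a reverse table mapping the result word to its expected sign, compared with the integer sign of the weighted sum.
-- outside the precondition, e.g. on check({'a': 1}, ['a a down', 'bad']): A returns False, B returns False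
import Mathlib
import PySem

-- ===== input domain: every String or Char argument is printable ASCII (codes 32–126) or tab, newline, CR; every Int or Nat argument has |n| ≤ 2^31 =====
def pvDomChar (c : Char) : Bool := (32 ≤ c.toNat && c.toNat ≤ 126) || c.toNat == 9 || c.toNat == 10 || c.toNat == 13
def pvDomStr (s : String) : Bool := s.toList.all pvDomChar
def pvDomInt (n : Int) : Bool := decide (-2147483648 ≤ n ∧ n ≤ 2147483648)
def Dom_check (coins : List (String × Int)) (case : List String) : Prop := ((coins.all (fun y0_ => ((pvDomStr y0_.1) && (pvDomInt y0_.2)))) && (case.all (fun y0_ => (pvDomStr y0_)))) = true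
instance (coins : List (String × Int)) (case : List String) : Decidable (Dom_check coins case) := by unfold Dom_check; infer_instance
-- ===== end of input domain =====

-- B checks each weighing via a signed character-multiplicity dict (left +1, right -1) summed
-- once against the coin table, and a result-word → expected-sign table; A keeps two side totals
-- and three comparison branches. Objective: alternative (same cost, different data structure).


-- ===== PORT A =====
-- Python's coins[i]: first-match association-list lookup (none = KeyError)
def coinGetA (coins : List (String × Int)) (k : String) : Option Int :=
  match coins with
  | [] => none
  | (a, v) :: rest => if a == k then some v else coinGetA rest k

-- sum(coins[i] for i in s)  (getD 0 only reachable outside Pre_check)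
def sumA (coins : List (String × Int)) (s : String) : Int :=
  s.toList.foldl (fun acc c => acc + (coinGetA coins (String.ofList [c])).getD 0) 0

def check (coins : List (String × Int)) (case : List String) : Bool :=
  match case with
  | [] => true
  | item :: rest =>
    match PySem.Str.split₀ item with
    | [left, right, res] =>
      let left_total := sumA coins left
      let right_total := sumA coins right
      if left_total == right_total && res != "even" then false
      else if decide (left_total < right_total) && res != "down" then false
      else if decide (left_total > right_total) && res != "up" then false
      else check coins rest
    | _ => false  -- ValueError in Python; outside Pre_check

-- ===== PORT B =====
-- Python's coins[c], B's copy: first match in the association list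
def coinGetB (coins : List (String × Int)) (k : String) : Option Int :=
  (coins.find? fun p => p.1 == k).map (·.2)

-- SIGN = {'even': 0, 'down': -1, 'up': 1}
def signTableB : PySem.Dict String Int :=
  PySem.Dict.ofList [("even", 0), ("down", -1), ("up", 1)]

-- delta: for c in left: delta[c] += 1; for c in right: delta[c] -= 1
def deltaB (left right : String) : PySem.Dict Char Int :=
  right.toList.foldl (fun d c => d.insert c (d.getD c 0 - 1))
    (left.toList.foldl (fun d c => d.insert c (d.getD c 0 + 1)) PySem.Dict.empty)

-- diff = sum(coins[c] * n for c, n in delta.items())  (getD 0 only reachable outside Pre_check)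
def diffB (coins : List (String × Int)) (left right : String) : Int :=
  (deltaB left right).items.foldl
    (fun acc p => acc + (coinGetB coins (String.ofList [p.1])).getD 0 * p.2) 0

-- ok(item): unpack, build the signed multiplicity dict, one table lookup against the sign
def itemOkB (coins : List (String × Int)) (item : String) : Bool :=
  let parts := PySem.Str.split₀ item
  if parts.length == 3 then
    let diff := diffB coins (parts.getD 0 "") (parts.getD 1 "")
    let sgn : Int := (if decide (0 < diff) then 1 else 0) - (if decide (diff < 0) then 1 else 0)
    signTableB.get? (parts.getD 2 "") == some sgn
  else false  -- ValueError in Python; outside Pre_check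

def check_alt (coins : List (String × Int)) (case : List String) : Bool :=
  case.all (itemOkB coins)

-- ===== PRECONDITION & SPEC =====
-- Pre_check excludes inputs on which Python A raises (a line not splitting into exactly three
-- tokens: ValueError; a coin character missing from coins: KeyError). Being closed-form it demands
-- this of EVERY line, even past a line at which A already returns False; on such excluded inputs
-- both programs still return the same value.
def Pre_check (coins : List (String × Int)) (case : List String) : Prop :=
  (case.all fun item =>
    ((PySem.Str.split₀ item).length == 3) &&
    ((PySem.Str.split₀ item).take 2).all fun s =>
      s.toList.all fun c => coins.any fun p => p.1.toList == [c]) = true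
instance (coins : List (String × Int)) (case : List String) : Decidable (Pre_check coins case) := by
  unfold Pre_check; infer_instance

def pvWitness_check : (List (String × Int)) × List String :=
  ([("a", 1), ("b", 2)], ["a b down", "ab ab even", "b a up"])

def Spec_check (coins : List (String × Int)) (case : List String) (out : Bool) : Prop := out = check_alt coins case
instance (coins : List (String × Int)) (case : List String) (out : Bool) : Decidable (Spec_check coins case out) := by unfold Spec_check; infer_instance

-- ===== CLAIM (what is proved, stated in full; the proofs are below) =====
def Claim_equal_check : Prop := ∀ (coins : List (String × Int)) (case : List String), Dom_check coins case → Pre_check coins case → Spec_check coins case (check coins case)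

-- ===== LEMMAS AND PROOFS =====
theorem coinGetB_eq (coins : List (String × Int)) (k : String) :
    coinGetB coins k = coinGetA coins k := by
  induction coins with
  | nil => rfl
  | cons hd tl ih =>
    cases hd with
    | mk a v =>
      by_cases h : a == k
      · simp [coinGetA, coinGetB, List.find?, h]
      · simp only [coinGetA, coinGetB, List.find?, h]
        simpa [coinGetB] using ih

-- getD of the signed counting fold (the -1 twin of PySem.Dict.getD_foldl_insert_add_one)
theorem getD_foldl_insert_sub_one (l : List Char) (d : PySem.Dict Char Int) (v : Char) :
    (l.foldl (fun d x => d.insert x (d.getD x 0 - 1)) d).getD v 0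
      = d.getD v 0 - l.count v := by
  induction l generalizing d with
  | nil => simp
  | cons x xs ih =>
    simp only [List.foldl_cons, ih, PySem.Dict.getD_insert, List.count_cons]
    by_cases h : v = x
    · simp [h]; ring
    · have hx : ¬ x = v := fun e => h e.symm
      simp [h, hx]

theorem getD_deltaB (left right : String) (v : Char) :
    (deltaB left right).getD v 0
      = (left.toList.count v : Int) - right.toList.count v := by
  simp [deltaB, getD_foldl_insert_sub_one, PySem.Dict.getD_foldl_insert_add_one]

theorem nodup_keys_deltaB (left right : String) : (deltaB left right).keys.Nodup := by
  unfold deltaB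
  exact PySem.Dict.nodup_keys_foldl_insert _ _ _
    (PySem.Dict.nodup_keys_foldl_insert _ _ _ PySem.Dict.nodup_keys_empty)

theorem mem_keys_deltaB (left right : String) (c : Char) :
    c ∈ (deltaB left right).keys ↔ c ∈ left.toList ∨ c ∈ right.toList := by
  simp [deltaB, PySem.Dict.keys_foldl_insert, PySem.Set.mem_update, PySem.Dict.keys_empty]

-- cons step of the weighted-count sum
theorem sum_weighted_count_cons (w : Char → Int) (K : List Char) (hK : K.Nodup)
    (x : Char) (hx : x ∈ K) (l : List Char) :
    (K.map fun k => w k * ((x :: l).count k : Int)).sum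
      = w x + (K.map fun k => w k * (l.count k : Int)).sum := by
  induction K with
  | nil => cases hx
  | cons k K' ih =>
    rcases List.nodup_cons.mp hK with ⟨hk, hK'⟩
    rcases List.mem_cons.mp hx with hx | hx
    · subst hx
      have hco : ∀ j ∈ K', w j * ((x :: l).count j : Int) = w j * (l.count j : Int) := by
        intro j hj
        have hjx : j ≠ x := fun h => hk (h ▸ hj)
        simp [Ne.symm hjx]
      simp only [List.map_cons, List.sum_cons, List.count_cons_self, List.map_congr_left hco]
      push_cast; ring
    · have hkx : k ≠ x := fun h => hk (h ▸ hx)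
      have hhead : ((x :: l).count k : Int) = l.count k := by
        simp [Ne.symm hkx]
      simp only [List.map_cons, List.sum_cons, ih hK' hx, hhead]
      ring

-- pointwise subtraction distributes over the list sum (Int)
theorem sum_map_sub_int (l : List Char) (f g : Char → Int) :
    (l.map fun a => f a - g a).sum = (l.map f).sum - (l.map g).sum := by
  induction l with
  | nil => simp
  | cons x xs ih => simp [ih]; ring

-- a nodup cover of l turns the weighted-count sum into the plain sum over l
theorem sum_weighted_count (w : Char → Int) (K : List Char) (hK : K.Nodup) :
    ∀ (l : List Char), (∀ c ∈ l, c ∈ K) →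
      (K.map fun k => w k * (l.count k : Int)).sum = (l.map w).sum := by
  intro l
  induction l with
  | nil => intro _; simp
  | cons x xs ih =>
    intro hcov
    rw [sum_weighted_count_cons w K hK x (hcov x (by simp)),
      ih (fun c hc => hcov c (by simp [hc]))]
    simp

-- B's dict-based diff is A's left total minus A's right total
theorem diffB_eq (coins : List (String × Int)) (left right : String) :
    diffB coins left right = sumA coins left - sumA coins right := by
  have hw : ∀ p : Char × Int,
      (coinGetB coins (String.ofList [p.1])).getD 0 * p.2
        = (fun p : Char × Int => (coinGetA coins (String.ofList [p.1])).getD 0 * p.2) p := by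
    intro p; simp [coinGetB_eq]
  set w : Char → Int := fun c => (coinGetA coins (String.ofList [c])).getD 0 with hwdef
  have hitems : (deltaB left right).items
      = (deltaB left right).keys.map (fun k => (k, (deltaB left right).getD k 0)) :=
    PySem.Dict.items_eq_map_keys _ (nodup_keys_deltaB left right) 0
  have hnd := nodup_keys_deltaB left right
  unfold diffB
  simp only [PySem.List.foldl_add, zero_add]
  rw [hitems, List.map_map]
  have hmap : ((fun p : Char × Int => (coinGetB coins (String.ofList [p.1])).getD 0 * p.2) ∘
      fun k => (k, (deltaB left right).getD k 0))
      = fun k => w k * ((left.toList.count k : Int) - right.toList.count k) := by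
    funext k; simp [hwdef, coinGetB_eq, getD_deltaB]
  rw [hmap]
  have hsplit : (deltaB left right).keys.map
        (fun k => w k * ((left.toList.count k : Int) - right.toList.count k))
      = (deltaB left right).keys.map
          (fun k => w k * (left.toList.count k : Int)
            - w k * (right.toList.count k : Int)) := by
    apply List.map_congr_left; intro k _; ring
  rw [hsplit, sum_map_sub_int]
  rw [sum_weighted_count w _ hnd left.toList
        (fun c hc => (mem_keys_deltaB left right c).mpr (Or.inl hc)),
      sum_weighted_count w _ hnd right.toList
        (fun c hc => (mem_keys_deltaB left right c).mpr (Or.inr hc))]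
  simp [sumA, PySem.List.foldl_add, hwdef]

-- the literal table in first-member form
theorem signTableB_eq : signTableB = PySem.Dict.mk [("even", 0), ("down", -1), ("up", 1)] := by rfl

-- the three-entry result table, solved for an arbitrary candidate sign
theorem sign_lookup (res : String) (v : Int) :
    signTableB.get? res = some v
      ↔ ((res = "even" ∧ v = 0) ∨ (res = "down" ∧ v = -1) ∨ (res = "up" ∧ v = 1)) := by
  rw [signTableB_eq]
  by_cases he : res = "even"
  · subst he; simp [PySem.Dict.get?_mk_cons, eq_comm]
  · by_cases hdn : res = "down"
    · subst hdn; simp [PySem.Dict.get?_mk_cons, eq_comm]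
    · by_cases hu : res = "up"
      · subst hu; simp [PySem.Dict.get?_mk_cons, eq_comm]
      · simp [Ne.symm he, Ne.symm hdn, Ne.symm hu, PySem.Dict.get?, he, hdn, hu]

-- A and B agree on every input (Pre_check is only needed to mirror where the Python raises)
theorem check_eq_alt (coins : List (String × Int)) (case : List String) :
    check coins case = check_alt coins case := by
  induction case with
  | nil => rfl
  | cons item rest ih =>
    show check coins (item :: rest) = check_alt coins (item :: rest)
    unfold check
    rw [show check_alt coins (item :: rest)
          = (itemOkB coins item && check_alt coins rest) from List.all_cons ..]
    rcases h : PySem.Str.split₀ item with _ | ⟨l, _ | ⟨r, _ | ⟨res, _ | ⟨d, tl⟩⟩⟩⟩ <;>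
      simp only [] <;> try simp [itemOkB, h]
    rcases lt_trichotomy (sumA coins l) (sumA coins r) with hlt | heq | hgt
    · -- left total < right total: diff < 0, the expected result word is "down"
      have hdneg : diffB coins l r < 0 := by rw [diffB_eq]; omega
      have hdpos : ¬ 0 < diffB coins l r := by rw [diffB_eq]; omega
      by_cases hres : res = "down" <;>
        simp [ne_of_lt hlt, hlt, not_lt_of_gt hlt, hdneg, hdpos, hres, sign_lookup, ih]
    · -- equal totals: diff = 0, the expected result word is "even"
      have hdz : diffB coins l r = 0 := by rw [diffB_eq]; omega
      by_cases hres : res = "even" <;> simp [heq, hdz, hres, sign_lookup, ih]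
    · -- left total > right total: diff > 0, the expected result word is "up"
      have hdpos : 0 < diffB coins l r := by rw [diffB_eq]; omega
      have hdneg : ¬ diffB coins l r < 0 := by rw [diffB_eq]; omega
      by_cases hres : res = "up" <;>
        simp [ne_of_gt hgt, hgt, not_lt_of_gt hgt, hdneg, hdpos, hres, sign_lookup, ih]

-- ===== VERDICT (by name: the statement is the Claim_ definition above) =====
theorem check_spec : Claim_equal_check := by
  intro coins case _ _
  exact check_eq_alt coins case
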